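-- pv_equiv track=rewrite | github.com/noamjanco/unrolling_synchronization | experiments/j_synchronization.py | calc_pair_dict
-- ===== SOURCE A (Python) =====
-- def calc_pair_dict(N):
--     d = {}
--     idx = 0
--     for i in range(N):
--         for j in range(i+1,N):
--             d[(i,j)] = idx
--             d[(j,i)] = idx
--             idx +=1
--     return d
--
-- N = 20
-- ===== SOURCE B (Python) =====
-- def calc_pair_dict(N):
--     # One flat loop over the N*(N-1)//2 linear pair slots: the loop index k IS
--     # the pair's value, and an (i, j) cursor is advanced with an explicit carry
--     # when a row is exhausted -- no nested loops and no running counter.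
--     if N < 2:
--         return {}
--     d = {}
--     i, j = 0, 1
--     for k in range(N * (N - 1) // 2):
--         d[(i, j)] = k
--         d[(j, i)] = k
--         if j + 1 < N:
--             j += 1
--         else:
--             i += 1
--             j = i + 1
--     return d
-- ===== Notes on version B (the rewrite author's own statement) =====
-- stated objective: alternative
-- what changed: Replaces A's nested triangular loops with a mutated running idx counter by a single flat loop over the N*(N-1)//2 linear pair slots, using the loop index itself as each pair's value and advancing an (i,j) cursor with an explicit carry at row boundaries.
import Mathlib
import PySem

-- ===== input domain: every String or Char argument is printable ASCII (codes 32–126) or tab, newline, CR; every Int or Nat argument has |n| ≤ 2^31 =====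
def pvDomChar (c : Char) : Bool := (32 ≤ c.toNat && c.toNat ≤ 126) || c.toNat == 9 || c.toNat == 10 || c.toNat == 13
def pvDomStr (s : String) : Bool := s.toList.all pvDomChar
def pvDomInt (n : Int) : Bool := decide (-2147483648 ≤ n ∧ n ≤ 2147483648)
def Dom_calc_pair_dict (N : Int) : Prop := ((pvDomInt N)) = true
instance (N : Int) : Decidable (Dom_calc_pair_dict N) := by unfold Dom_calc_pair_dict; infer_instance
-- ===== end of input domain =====

-- B replaces A's nested triangular loops with a running counter by a single flat loop
-- over the N*(N-1)//2 linear pair slots whose loop index is the value, advancing an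
-- (i, j) cursor with an explicit carry (objective: alternative).

-- ===== PORT A =====
def calc_pair_dict (N : Int) : List (Int × Int × Int) :=
  let st : PySem.Dict (Int × Int) Int × Int :=
    (PySem.List.pyRange 0 N 1).foldl
      (fun st i =>
        (PySem.List.pyRange (i + 1) N 1).foldl
          (fun st j =>
            ((st.1.insert (i, j) st.2).insert (j, i) st.2, st.2 + 1)) st)
      (PySem.Dict.empty, 0)
  st.1.items.map (fun kv => (kv.1.1, kv.1.2, kv.2))

-- ===== PORT B =====
def calc_pair_dict_alt (N : Int) : List (Int × Int × Int) :=
  if N < 2 then [] else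
  let st : PySem.Dict (Int × Int) Int × Int × Int :=
    (PySem.List.pyRange 0 (PySem.Int.floordiv (N * (N - 1)) 2) 1).foldl
      (fun st k =>
        let d := (st.1.insert (st.2.1, st.2.2) k).insert (st.2.2, st.2.1) k
        if st.2.2 + 1 < N then (d, st.2.1, st.2.2 + 1)
        else (d, st.2.1 + 1, st.2.1 + 2))
      (PySem.Dict.empty, 0, 1)
  st.1.items.map (fun kv => (kv.1.1, kv.1.2, kv.2))

-- ===== PRECONDITION & SPEC =====
def Spec_calc_pair_dict (N : Int) (out : List (Int × Int × Int)) : Prop := out = calc_pair_dict_alt N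
instance (N : Int) (out : List (Int × Int × Int)) : Decidable (Spec_calc_pair_dict N out) := by unfold Spec_calc_pair_dict; infer_instance

-- ===== CLAIM (what is proved, stated in full; the proofs are below) =====
def Claim_equal_calc_pair_dict : Prop := ∀ (N : Int), Dom_calc_pair_dict N → Spec_calc_pair_dict N (calc_pair_dict N)

-- ===== LEMMAS AND PROOFS =====

-- fold a list of (key, value) entries into a dict by insertion
def pvIns (d : PySem.Dict (Int × Int) Int) (l : List ((Int × Int) × Int)) : PySem.Dict (Int × Int) Int :=
  l.foldl (fun d p => d.insert p.1 p.2) d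

-- the entries of row i starting at column j with next value c, a pairs to go
def pvRowEnt : Nat → Int → Int → Int → List ((Int × Int) × Int)
  | 0, _, _, _ => []
  | a + 1, i, j, c => ((i, j), c) :: ((j, i), c) :: pvRowEnt a i (j + 1) (c + 1)

-- the entries of rows i, i+1, … (m rows to go), next value c  (A's traversal)
def pvAEnt (N : Int) : Nat → Int → Int → List ((Int × Int) × Int)
  | 0, _, _ => []
  | m + 1, i, c =>
      pvRowEnt (N - (i + 1)).toNat i (i + 1) c ++
        pvAEnt N m (i + 1) (c + ((N - (i + 1)).toNat : Int))

-- the entries produced by B's flat loop: fuel m, cursor (i, j), next value k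
def pvBEnt (N : Int) : Nat → Int → Int → Int → List ((Int × Int) × Int)
  | 0, _, _, _ => []
  | m + 1, i, j, k =>
      ((i, j), k) :: ((j, i), k) ::
        (if j + 1 < N then pvBEnt N m i (j + 1) (k + 1)
         else pvBEnt N m (i + 1) (i + 2) (k + 1))

lemma pv_pyRange_nil (a b : Int) (h : b ≤ a) : PySem.List.pyRange a b 1 = [] := by
  rw [PySem.List.pyRange_one]
  have : (b - a).toNat = 0 := by omega
  simp [this]

-- A's inner loop over row i from column j
lemma pv_innerA (N i : Int) : ∀ (a : Nat) (j c : Int) (d : PySem.Dict (Int × Int) Int),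
    a = (N - j).toNat →
    (PySem.List.pyRange j N 1).foldl
      (fun st j => ((st.1.insert (i, j) st.2).insert (j, i) st.2, st.2 + 1)) (d, c)
    = (pvIns d (pvRowEnt a i j c), c + (a : Int)) := by
  intro a
  induction a with
  | zero =>
    intro j c d ha
    rw [pv_pyRange_nil j N (by omega)]
    simp [pvRowEnt, pvIns]
  | succ a ih =>
    intro j c d ha
    have hjN : j < N := by omega
    rw [PySem.List.pyRange_one_cons hjN]
    simp only [List.foldl_cons]
    rw [ih (j + 1) (c + 1) _ (by omega)]
    simp only [pvRowEnt, pvIns, List.foldl_cons]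
    have h2 : c + 1 + (a : Int) = c + ((a + 1 : Nat) : Int) := by push_cast; ring
    rw [h2]

-- A's outer loop over rows
lemma pv_outerA (N : Int) : ∀ (m : Nat) (i c : Int) (d : PySem.Dict (Int × Int) Int),
    m = (N - i).toNat →
    ∃ c', (PySem.List.pyRange i N 1).foldl
        (fun st i =>
          (PySem.List.pyRange (i + 1) N 1).foldl
            (fun st j => ((st.1.insert (i, j) st.2).insert (j, i) st.2, st.2 + 1)) st)
        (d, c)
      = (pvIns d (pvAEnt N m i c), c') := by
  intro m
  induction m with
  | zero =>
    intro i c d hm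
    rw [pv_pyRange_nil i N (by omega)]
    exact ⟨c, by simp [pvAEnt, pvIns]⟩
  | succ m ih =>
    intro i c d hm
    have hiN : i < N := by omega
    rw [PySem.List.pyRange_one_cons hiN]
    simp only [List.foldl_cons]
    rw [pv_innerA N i (N - (i + 1)).toNat (i + 1) c d rfl]
    obtain ⟨c', hc'⟩ := ih (i + 1) (c + ((N - (i + 1)).toNat : Int))
      (pvIns d (pvRowEnt (N - (i + 1)).toNat i (i + 1) c)) (by omega)
    refine ⟨c', ?_⟩
    rw [hc']
    simp only [pvAEnt, pvIns, List.foldl_append]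

-- B's flat loop produces pvBEnt's entries
lemma pv_loopB (N : Int) : ∀ (m : Nat) (k i j : Int) (d : PySem.Dict (Int × Int) Int),
    ∃ p : Int × Int, (PySem.List.pyRange k (k + (m : Int)) 1).foldl
        (fun st k =>
          let d := (st.1.insert (st.2.1, st.2.2) k).insert (st.2.2, st.2.1) k
          if st.2.2 + 1 < N then (d, st.2.1, st.2.2 + 1)
          else (d, st.2.1 + 1, st.2.1 + 2))
        (d, i, j)
      = (pvIns d (pvBEnt N m i j k), p) := by
  intro m
  induction m with
  | zero =>
    intro k i j d
    simp only [Nat.cast_zero, add_zero]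
    rw [pv_pyRange_nil k k le_rfl]
    exact ⟨(i, j), by simp [pvBEnt, pvIns]⟩
  | succ m ih =>
    intro k i j d
    have hk : k < k + ((m : Nat) + 1 : Int) := by omega
    have hrange : k + (((m : Nat) + 1 : Nat) : Int) = (k + 1) + ((m : Nat) : Int) := by
      push_cast; ring
    rw [hrange, PySem.List.pyRange_one_cons (by omega)]
    simp only [List.foldl_cons]
    by_cases hj : j + 1 < N
    · obtain ⟨p, hp⟩ := ih (k + 1) i (j + 1) ((d.insert (i, j) k).insert (j, i) k)
      refine ⟨p, ?_⟩
      simp only [hj, if_true]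
      rw [hp]
      simp [pvBEnt, pvIns, hj]
    · obtain ⟨p, hp⟩ := ih (k + 1) (i + 1) (i + 2) ((d.insert (i, j) k).insert (j, i) k)
      refine ⟨p, ?_⟩
      simp only [hj, if_false]
      rw [hp]
      simp [pvBEnt, pvIns, hj]

-- splitting one full row off B's entry stream
lemma pv_split (N : Int) : ∀ (a : Nat) (b : Nat) (i j k : Int),
    1 ≤ a → (a : Int) = N - j →
    pvBEnt N (a + b) i j k = pvRowEnt a i j k ++ pvBEnt N b (i + 1) (i + 2) (k + (a : Int)) := by
  intro a
  induction a with
  | zero => intro b i j k h1 _; omega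
  | succ a ih =>
    intro b i j k h1 ha
    rcases Nat.eq_zero_or_pos a with ha0 | hapos
    · subst ha0
      have hj : ¬ (j + 1 < N) := by simp at ha; omega
      have h1b : 1 + b = b + 1 := by omega
      rw [h1b]
      simp [pvBEnt, pvRowEnt, hj]
    · have hj : j + 1 < N := by push_cast at ha; omega
      have hstep : a + 1 + b = (a + b) + 1 := by omega
      rw [hstep]
      simp only [pvBEnt, pvRowEnt, if_pos hj]
      rw [ih b i (j + 1) (k + 1) hapos (by push_cast at ha ⊢; omega)]
      simp only [List.cons_append]
      have : k + 1 + (a : Int) = k + ((a : Nat) + 1 : Nat) := by push_cast; ring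
      rw [this]

-- the remaining-pair count of rows i, i+1, …
def pvRem (N i : Int) : Nat := (((N - i) * (N - i - 1)) / 2).toNat

lemma pv_rem_step (N i : Int) (h : i + 1 < N) :
    pvRem N i = (N - (i + 1)).toNat + pvRem N (i + 1) := by
  unfold pvRem
  obtain ⟨q, hq⟩ : (2 : Int) ∣ (N - (i + 1)) * (N - (i + 1) - 1) := by
    rcases Int.even_or_odd (N - (i + 1)) with he | ho
    · exact Dvd.dvd.mul_right he.two_dvd _
    · obtain ⟨c, hc⟩ := ho
      exact Dvd.dvd.mul_left ⟨c, by omega⟩ _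
  have h1 : (N - i) * (N - i - 1) = 2 * q + 2 * (N - i - 1) := by linear_combination hq
  have hp : 0 ≤ (N - (i + 1)) * (N - (i + 1) - 1) :=
    mul_nonneg (by omega) (by omega)
  have hqnn : 0 ≤ q := by linarith
  rw [h1, hq]
  omega

-- bridge: B's flat entry stream equals A's row-by-row entry stream
lemma pv_bridge (N : Int) : ∀ (m : Nat) (i k : Int),
    m = (N - i).toNat → i ≤ N →
    pvBEnt N (pvRem N i) i (i + 1) k = pvAEnt N m i k := by
  intro m
  induction m with
  | zero =>
    intro i k hm hiN
    have hiN' : i = N := by omega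
    have : pvRem N i = 0 := by unfold pvRem; subst hiN'; simp
    rw [this]
    simp [pvBEnt, pvAEnt]
  | succ m ih =>
    intro i k hm hiN
    have hiN' : i < N := by omega
    by_cases hlast : i + 1 < N
    · have hrow : pvRem N i = (N - (i + 1)).toNat + pvRem N (i + 1) := pv_rem_step N i hlast
      rw [hrow, pv_split N (N - (i + 1)).toNat (pvRem N (i + 1)) i (i + 1) k
        (by omega) (by omega)]
      have ihr := ih (i + 1) (k + ((N - (i + 1)).toNat : Int)) (by omega) (by omega)
      have h12 : i + 1 + 1 = (i + 2 : Int) := by ring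
      rw [h12] at ihr
      rw [ihr]
      simp [pvAEnt]
    · -- last row is empty: i = N - 1
      have hi : i = N - 1 := by omega
      have hm0 : m = 0 := by omega
      have hrem : pvRem N i = 0 := by unfold pvRem; subst hi; norm_num
      have hrow0 : (N - (i + 1)).toNat = 0 := by omega
      rw [hrem]
      subst hm0
      simp [pvBEnt, pvAEnt, hrow0, pvRowEnt]

-- ===== VERDICT (by name: the statement is the Claim_ definition above) =====
theorem calc_pair_dict_spec : Claim_equal_calc_pair_dict := by
  intro N _
  unfold Spec_calc_pair_dict
  by_cases hN : N < 2
  · -- A also returns the empty dict for N < 2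
    rw [calc_pair_dict_alt, if_pos hN]
    unfold calc_pair_dict
    by_cases hN0 : N ≤ 0
    · rw [pv_pyRange_nil 0 N (by omega)]
      simp [PySem.Dict.empty]
    · have h1 : N = 1 := by omega
      subst h1
      decide
  · have hN' : 2 ≤ N := by omega
    have htot : PySem.Int.floordiv (N * (N - 1)) 2 = (N * (N - 1)) / 2 :=
      PySem.Int.floordiv_eq_ediv_of_pos (by norm_num)
    have hnn : 0 ≤ (N * (N - 1)) / 2 := by
      have : 0 ≤ N * (N - 1) := by nlinarith
      positivity
    have htn : (0 : Int) + ((pvRem N 0 : Nat) : Int) = (N * (N - 1)) / 2 := by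
      have e : pvRem N 0 = ((N * (N - 1)) / 2).toNat := by unfold pvRem; norm_num
      rw [zero_add, e, Int.toNat_of_nonneg hnn]
    unfold calc_pair_dict
    obtain ⟨c', hA⟩ := pv_outerA N N.toNat 0 0 PySem.Dict.empty (by omega)
    rw [calc_pair_dict_alt, if_neg (by omega)]
    simp only []
    rw [htot, ← htn]
    obtain ⟨p, hB⟩ := pv_loopB N (pvRem N 0) 0 0 1 PySem.Dict.empty
    rw [hA, hB]
    have := pv_bridge N N.toNat 0 0 (by omega) (by omega)
    rw [show (0 : Int) + 1 = 1 from rfl] at this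
    rw [this]
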